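-- pv_equiv track=rewrite | github.com/h06-Cpy/useful | binsearch.py | expnum
-- ===== SOURCE A (Python) =====
-- def expnum(r,target):
--   l=1
--   cnt=1
--   centr=(l+r)//2
--   while True:
--     if centr==target:
--       break
--     elif centr<target:
--       l=centr
--       centr=(l+r)//2
--       cnt+=1
--     else:
--       r=centr
--       centr=(l+r)//2
--       cnt+=1
--   return cnt
-- ===== SOURCE B (Python) =====
-- def expnum(r, target):
--     # Non-tail recursion on the interval: the number of probes in (l, r) is
--     # 1 if the midpoint is the target, else 1 plus the probes in the half kept.
--     # Same floor midpoint and the same l=centr / r=centr narrowing as A, but the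
--     # count is built on the way back up instead of mutated in a loop.
--     def steps(l, r):
--         centr = (l + r) // 2
--         if centr == target:
--             return 1
--         if centr < target:
--             return 1 + steps(centr, r)
--         return 1 + steps(l, centr)
--     return steps(1, r)
-- ===== Notes on version B (the rewrite author's own statement) =====
-- stated objective: alternative
-- what changed: A's while-True loop mutating (l, r, centr, cnt) becomes a non-tail recursive helper steps(l, r) that returns 1 on a hit and 1 + steps(half) otherwise, so the count is composed on the way back up instead of carried as mutable state.
import Mathlib
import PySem

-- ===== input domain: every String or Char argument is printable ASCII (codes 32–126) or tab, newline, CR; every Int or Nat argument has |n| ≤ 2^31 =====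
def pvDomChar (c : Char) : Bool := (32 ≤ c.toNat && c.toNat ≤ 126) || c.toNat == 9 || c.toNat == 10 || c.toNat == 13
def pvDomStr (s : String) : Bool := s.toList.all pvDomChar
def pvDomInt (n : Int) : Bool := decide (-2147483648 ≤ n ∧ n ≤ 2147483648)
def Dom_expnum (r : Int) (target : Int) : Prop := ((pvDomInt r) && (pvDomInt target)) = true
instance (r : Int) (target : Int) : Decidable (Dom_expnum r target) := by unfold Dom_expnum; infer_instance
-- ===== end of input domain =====

-- B replaces A's while-True loop over mutable (l, r, centr, cnt) by a non-tail recursive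
-- helper steps(l, r) that returns 1 + the probes of the half kept (alternative decomposition,
-- same cost).  Python's `while True` can diverge, so each port carries a fuel parameter;
-- under Pre_ the search terminates well within that fuel.

-- ===== PORT A =====
-- A's loop body, step for step: state is (l, r, centr, cnt) exactly as in the Python;
-- fuel makes the possibly-infinite `while True` a total Lean function (exhaustion returns cnt,
-- reached only outside Pre_).
def expnumLoopA (target : Int) : Nat → Int → Int → Int → Int → Int
  | 0, _, _, _, cnt => cnt
  | fuel + 1, l, r, centr, cnt =>
    if centr = target then cnt
    else if centr < target then
      expnumLoopA target fuel centr r (PySem.Int.floordiv (centr + r) 2) (cnt + 1)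
    else
      expnumLoopA target fuel l centr (PySem.Int.floordiv (l + centr) 2) (cnt + 1)

def expnum (r : Int) (target : Int) : Int :=
  expnumLoopA target (r.toNat + 2) 1 r (PySem.Int.floordiv (1 + r) 2) 1

-- ===== PORT B =====
-- B's helper steps(l, r): 1 on a hit, otherwise 1 + the count of the kept half.
-- Fuel exhaustion yields 1 (an arbitrary value only reachable outside Pre_).
def expnumSteps (target : Int) : Nat → Int → Int → Int
  | 0, _, _ => 1
  | fuel + 1, l, r =>
    let centr := PySem.Int.floordiv (l + r) 2
    if centr = target then 1
    else if centr < target then 1 + expnumSteps target fuel centr r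
    else 1 + expnumSteps target fuel l centr

def expnum_alt (r : Int) (target : Int) : Int :=
  expnumSteps target (2 * r.toNat + 4) 1 r

-- ===== PRECONDITION & SPEC =====
-- Pre_ excludes exactly the inputs on which A's while-True loop never returns (the search
-- interval degenerates without the midpoint ever hitting target); A returns on all others.
def Pre_expnum (r : Int) (target : Int) : Prop :=
  target = PySem.Int.floordiv (1 + r) 2 ∨ (2 ≤ r ∧ 1 ≤ target ∧ target ≤ r - 1)
instance (r : Int) (target : Int) : Decidable (Pre_expnum r target) := by
  unfold Pre_expnum; infer_instance

def pvWitness_expnum : Int × Int := (10, 3)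

def Spec_expnum (r : Int) (target : Int) (out : Int) : Prop := out = expnum_alt r target
instance (r : Int) (target : Int) (out : Int) : Decidable (Spec_expnum r target out) := by
  unfold Spec_expnum; infer_instance

-- ===== CLAIM (what is proved, stated in full; the proofs are below) =====
def Claim_equal_expnum : Prop :=
  ∀ (r : Int) (target : Int), Dom_expnum r target → Pre_expnum r target →
    Spec_expnum r target (expnum r target)

-- ===== LEMMAS AND PROOFS =====
-- With equal fuel the two recursions visit the same intervals, and A's accumulator cnt
-- relates to B's built-up count by: A's result = cnt - 1 + B's result.
theorem expnumLoopA_eq_steps (target : Int) :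
    ∀ (fuel : Nat) (l r cnt : Int),
      expnumLoopA target fuel l r (PySem.Int.floordiv (l + r) 2) cnt =
        cnt - 1 + expnumSteps target fuel l r := by
  intro fuel
  induction fuel with
  | zero => intro l r cnt; simp [expnumLoopA, expnumSteps]
  | succ n ih =>
    intro l r cnt
    simp only [expnumLoopA, expnumSteps]
    split_ifs with h1 h2
    · omega
    · rw [ih]; omega
    · rw [ih]; omega

-- Midpoint bracketing: while the invariant l ≤ target ≤ r - 1 holds and the midpoint misses
-- target, the interval strictly shrinks; hence any fuel ≥ (r - l).toNat gives the same result.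
theorem expnumSteps_fuel_irrel (target : Int) :
    ∀ (f f' : Nat) (l r : Int), l ≤ target → target ≤ r - 1 →
      (r - l).toNat ≤ f → (r - l).toNat ≤ f' →
      expnumSteps target f l r = expnumSteps target f' l r := by
  intro f
  induction f with
  | zero => intro f' l r h1 h2 hf _; omega
  | succ n ih =>
    intro f' l r h1 h2 hf hf'
    obtain ⟨m, rfl⟩ : ∃ m, f' = m + 1 := ⟨f' - 1, by omega⟩
    simp only [expnumSteps]
    split_ifs with hhit hlt
    · rfl
    · -- centr < target: recurse on (centr, r)
      have hr2 : l + 2 ≤ r := by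
        by_contra hcon
        have hreq : r = l + 1 := by omega
        have : PySem.Int.floordiv (l + r) 2 = l := by
          rw [PySem.Int.floordiv_eq_iff_of_pos (by omega)]; omega
        omega
      have hlo : l + 1 ≤ PySem.Int.floordiv (l + r) 2 := by
        rw [PySem.Int.le_floordiv_iff_mul_le (by omega)]; omega
      have hhi : PySem.Int.floordiv (l + r) 2 < r := by
        rw [PySem.Int.floordiv_lt_iff_lt_mul (by omega)]; omega
      rw [ih m _ _ (by omega) h2 (by omega) (by omega)]
    · -- centr > target: recurse on (l, centr)
      have hr2 : l + 2 ≤ r := by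
        by_contra hcon
        have hreq : r = l + 1 := by omega
        have : PySem.Int.floordiv (l + r) 2 = l := by
          rw [PySem.Int.floordiv_eq_iff_of_pos (by omega)]; omega
        omega
      have hlo : l + 1 ≤ PySem.Int.floordiv (l + r) 2 := by
        rw [PySem.Int.le_floordiv_iff_mul_le (by omega)]; omega
      have hhi : PySem.Int.floordiv (l + r) 2 < r := by
        rw [PySem.Int.floordiv_lt_iff_lt_mul (by omega)]; omega
      rw [ih m _ _ h1 (by omega) (by omega) (by omega)]

-- ===== VERDICT (by name: the statement is the Claim_ definition above) =====
theorem expnum_spec : Claim_equal_expnum := by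
  intro r target _ hpre
  show expnum r target = expnum_alt r target
  unfold expnum expnum_alt
  rw [expnumLoopA_eq_steps]
  rcases hpre with hhit | ⟨hr, ht1, ht2⟩
  · -- immediate hit: the first midpoint test succeeds at any nonzero fuel
    have h1 : ∀ f : Nat, expnumSteps target (f + 1) 1 r = 1 := by
      intro f; simp only [expnumSteps]; rw [hhit.symm]; simp
    rw [show r.toNat + 2 = (r.toNat + 1) + 1 from rfl,
        show 2 * r.toNat + 4 = (2 * r.toNat + 3) + 1 from rfl, h1, h1]
    omega
  · rw [expnumSteps_fuel_irrel target (r.toNat + 2) (2 * r.toNat + 4) 1 r ht1 ht2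
        (by omega) (by omega)]
    omega
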